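-- pv_equiv track=rewrite | github.com/quantumrook/qr-static-site-generator | handlers/headers.py | __handle_syntax
-- ===== SOURCE A (Python) =====
-- def __handle_syntax(markdown_body: list[str], syntax_md: str, html_start: str, html_end: str) -> list[str]:
--
--     started_section = False
--     for line_index, line in enumerate(markdown_body):
--         if syntax_md in line:
--             if started_section:
--                 markdown_body[line_index -1 ] += "</section>\n"
--                 started_section = False
--             header_content = line.strip().strip(syntax_md)
--             header_alias = header_content.strip().replace(" ", "-")
--             markdown_body[line_index] = f'{html_start}{header_alias}">{header_content}{html_end}'
--             started_section = True
--         if (line_index+1) == len(markdown_body) and started_section: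
--             markdown_body[line_index] += "</section>\n"
--
--     return markdown_body
-- ===== SOURCE B (Python) =====
-- def __handle_syntax(markdown_body: list[str], syntax_md: str, html_start: str, html_end: str) -> list[str]:
--     heads = [i for i, line in enumerate(markdown_body) if syntax_md in line]
--     for h in heads:
--         header_content = markdown_body[h].strip().strip(syntax_md)
--         header_alias = header_content.strip().replace(" ", "-")
--         markdown_body[h] = f'{html_start}{header_alias}">{header_content}{html_end}'
--     closes = [h - 1 for h in heads[1:]]
--     if heads:
--         closes.append(len(markdown_body) - 1)
--     for c in closes:
--         markdown_body[c] += "</section>\n"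
--     return markdown_body
-- ===== Notes on version B (the rewrite author's own statement) =====
-- stated objective: alternative
-- what changed: Replaces A's single stateful pass (a started_section flag driving back-patches of the previous line) with three independent passes: collect header indices, transform all header lines, then append the section closes computed directly from the index list (predecessor of each later header, plus the last line).
import Mathlib
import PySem

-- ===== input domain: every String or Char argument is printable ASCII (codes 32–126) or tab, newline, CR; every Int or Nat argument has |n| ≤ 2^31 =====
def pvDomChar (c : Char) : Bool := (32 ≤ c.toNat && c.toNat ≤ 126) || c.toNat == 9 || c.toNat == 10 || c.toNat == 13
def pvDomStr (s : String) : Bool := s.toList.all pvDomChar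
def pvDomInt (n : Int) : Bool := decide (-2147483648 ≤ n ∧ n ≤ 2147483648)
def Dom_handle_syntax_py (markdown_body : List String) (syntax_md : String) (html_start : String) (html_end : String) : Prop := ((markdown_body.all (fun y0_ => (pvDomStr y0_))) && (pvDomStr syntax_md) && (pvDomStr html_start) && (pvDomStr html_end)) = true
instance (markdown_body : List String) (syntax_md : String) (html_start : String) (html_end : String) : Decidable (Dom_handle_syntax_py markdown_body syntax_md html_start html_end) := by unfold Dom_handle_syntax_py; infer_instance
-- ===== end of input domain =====

-- B replaces A's single stateful pass (started_section flag, back-patching the previous line) by three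
-- independent passes: collect header indices, transform every header line, then append the section closes
-- computed from the index list. Both versions mutate markdown_body in place in Python and return it; the
-- in-place result and the return value coincide, so the proved return-value equality covers both.

-- Python index (negative index counts from the end), shared by both ports
def pyIdx (n : Nat) (i : Int) : Nat := (if i < 0 then i + n else i).toNat

-- ===== PORT A =====
-- loop body of A's `for line_index, line in enumerate(markdown_body)` (the list is mutated in place,
-- so `line` is fetched from the current list; N = len(markdown_body), which the loop never changes)
def aStep (syntax_md html_start html_end : String) (N : Nat) (st : List String × Bool) (line_index : Nat) : List String × Bool :=
  let line := st.1.getD line_index ""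
  let st1 : List String × Bool :=
    if PySem.Str.isIn syntax_md line then
      let body1 :=
        if st.2 then
          let j := pyIdx st.1.length ((line_index : Int) - 1)
          st.1.set j (st.1.getD j "" ++ "</section>\n")
        else st.1
      let header_content := PySem.Str.stripChars (PySem.Str.strip line) syntax_md
      let header_alias := PySem.Str.replace (PySem.Str.strip header_content) " " "-"
      (body1.set line_index (html_start ++ header_alias ++ "\">" ++ header_content ++ html_end), true)
    else (st.1, st.2)
  if line_index + 1 = N ∧ st1.2 then
    (st1.1.set line_index (st1.1.getD line_index "" ++ "</section>\n"), st1.2)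
  else st1

def handle_syntax_py (markdown_body : List String) (syntax_md : String) (html_start : String) (html_end : String) : List String :=
  ((List.range markdown_body.length).foldl (aStep syntax_md html_start html_end markdown_body.length) (markdown_body, false)).1

-- ===== PORT B =====
-- transform pass: rewrite the header line at (Python) index h
def bStepT (syntax_md html_start html_end : String) (body : List String) (h : Int) : List String :=
  let hn := pyIdx body.length h
  let header_content := PySem.Str.stripChars (PySem.Str.strip (body.getD hn "")) syntax_md
  let header_alias := PySem.Str.replace (PySem.Str.strip header_content) " " "-"
  body.set hn (html_start ++ header_alias ++ "\">" ++ header_content ++ html_end)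

-- close pass: markdown_body[c] += "</section>\n"
def bStepC (body : List String) (c : Int) : List String :=
  let cn := pyIdx body.length c
  body.set cn (body.getD cn "" ++ "</section>\n")

def handle_syntax_py_alt (markdown_body : List String) (syntax_md : String) (html_start : String) (html_end : String) : List String :=
  let heads : List Int := (PySem.List.enumerate markdown_body).filterMap
      (fun p => if PySem.Str.isIn syntax_md p.2 then some p.1 else none)
  let body := heads.foldl (bStepT syntax_md html_start html_end) markdown_body
  let closes : List Int := heads.tail.map (fun h => h - 1) ++
      (if heads.isEmpty then [] else [(markdown_body.length : Int) - 1])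
  closes.foldl bStepC body

-- ===== PRECONDITION & SPEC =====
def Spec_handle_syntax_py (markdown_body : List String) (syntax_md : String) (html_start : String) (html_end : String) (out : List String) : Prop := out = handle_syntax_py_alt markdown_body syntax_md html_start html_end
instance (markdown_body : List String) (syntax_md : String) (html_start : String) (html_end : String) (out : List String) : Decidable (Spec_handle_syntax_py markdown_body syntax_md html_start html_end out) := by unfold Spec_handle_syntax_py; infer_instance

-- ===== CLAIM (what is proved, stated in full; the proofs are below) =====
def Claim_equal_handle_syntax_py : Prop := ∀ (markdown_body : List String) (syntax_md : String) (html_start : String) (html_end : String), Dom_handle_syntax_py markdown_body syntax_md html_start html_end → Spec_handle_syntax_py markdown_body syntax_md html_start html_end (handle_syntax_py markdown_body syntax_md html_start html_end)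

-- ===== LEMMAS AND PROOFS =====

-- the "</section>\n" marker
def SECL : String := "</section>\n"

-- i is a header line of the original body
def HD (sm : String) (orig : List String) (i : Nat) : Bool := PySem.Str.isIn sm (orig.getD i "")

-- some header line before index k
def ANY (sm : String) (orig : List String) (k : Nat) : Bool := (List.range k).any (HD sm orig)

-- the transformed header line
def TR (sm hs he : String) (s : String) : String :=
  hs ++ PySem.Str.replace (PySem.Str.strip (PySem.Str.stripChars (PySem.Str.strip s) sm)) " " "-"
     ++ "\">" ++ PySem.Str.stripChars (PySem.Str.strip s) sm ++ he

-- line i after the transform pass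
def BASE (sm hs he : String) (orig : List String) (i : Nat) : String :=
  if HD sm orig i then TR sm hs he (orig.getD i "") else orig.getD i ""

-- the list after A has processed indices 0..k-1, k < length (the "last line" clause never fires there)
def STAGE (sm hs he : String) (orig : List String) (k : Nat) : List String :=
  (List.range orig.length).map fun i =>
    (if i < k then BASE sm hs he orig i else orig.getD i "") ++
    (if i + 1 < k ∧ HD sm orig (i+1) ∧ ANY sm orig (i+1) then SECL else "")

-- the common final value of both programs
def FINAL (sm hs he : String) (orig : List String) : List String :=
  (List.range orig.length).map fun i =>
    BASE sm hs he orig i ++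
    (if i + 1 < orig.length ∧ HD sm orig (i+1) ∧ ANY sm orig (i+1) then SECL else "") ++
    (if i + 1 = orig.length ∧ ANY sm orig orig.length then SECL else "")

lemma map_getD_range (xs : List String) (d : String) :
    (List.range xs.length).map (fun i => xs.getD i d) = xs := by
  apply List.ext_getElem
  · simp
  · intro i h1 h2
    simp [List.getD_eq_getElem?_getD, List.getElem?_eq_getElem h2]

lemma getD_set (xs : List String) (j : Nat) (v : String) (i : Nat) (d : String) :
    (xs.set j v).getD i d = if j = i ∧ j < xs.length then v else xs.getD i d := by
  simp only [List.getD_eq_getElem?_getD, List.getElem?_set]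
  split_ifs with h1 h2 h3 <;> simp_all <;> omega

lemma ANY_succ (sm : String) (orig : List String) (k : Nat) :
    ANY sm orig (k+1) = (ANY sm orig k || HD sm orig k) := by
  simp [ANY, List.range_succ]

lemma ANY_iff (sm : String) (orig : List String) (k : Nat) :
    ANY sm orig k = true ↔ ∃ j < k, HD sm orig j := by
  simp [ANY, List.any_eq_true, List.mem_range]

lemma ANY_mono (sm : String) (orig : List String) {a b : Nat} (h : a ≤ b)
    (ha : ANY sm orig a = true) : ANY sm orig b = true := by
  rw [ANY_iff] at *
  obtain ⟨j, hj, hh⟩ := ha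
  exact ⟨j, by omega, hh⟩

lemma STAGE_length (sm hs he : String) (orig : List String) (k : Nat) :
    (STAGE sm hs he orig k).length = orig.length := by simp [STAGE]

lemma STAGE_getD (sm hs he : String) (orig : List String) (k i : Nat) (hi : i < orig.length) :
    (STAGE sm hs he orig k).getD i "" =
      (if i < k then BASE sm hs he orig i else orig.getD i "") ++
      (if i + 1 < k ∧ HD sm orig (i+1) ∧ ANY sm orig (i+1) then SECL else "") := by
  unfold STAGE
  rw [PySem.List.getD_map_range _ _ _ _ hi]

lemma midStep (sm hs he : String) (orig : List String) (k : Nat) (hk : k + 1 < orig.length) :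
    aStep sm hs he orig.length (STAGE sm hs he orig k, ANY sm orig k) k
      = (STAGE sm hs he orig (k+1), ANY sm orig (k+1)) := by
  have hline : (STAGE sm hs he orig k).getD k "" = orig.getD k "" := by
    rw [STAGE_getD sm hs he orig k k (by omega)]
    simp
  have hlen := STAGE_length sm hs he orig k
  simp only [aStep, hline, hlen]
  by_cases hhd : HD sm orig k
  · have hhd' : PySem.Str.isIn sm (orig.getD k "") = true := hhd
    simp only [hhd', if_true]
    rw [if_neg (by rintro ⟨h, _⟩; omega : ¬ (k + 1 = orig.length ∧ True))]
    refine Prod.ext ?_ ?_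
    swap
    · show true = ANY sm orig (k+1)
      rw [ANY_succ, hhd]
      simp
    show _ = STAGE sm hs he orig (k+1)
    by_cases hany : ANY sm orig k
    · -- a previous header exists: close it, then transform line k
      have hk1 : 1 ≤ k := by
        rcases (ANY_iff sm orig k).mp hany with ⟨j, hj, _⟩
        omega
      have hj : pyIdx orig.length ((k : Int) - 1) = k - 1 := by
        unfold pyIdx
        rw [if_neg (by omega)]
        omega
      have hprev : (STAGE sm hs he orig k).getD (k-1) "" = BASE sm hs he orig (k-1) := by
        rw [STAGE_getD sm hs he orig k (k-1) (by omega)]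
        rw [if_pos (by omega), if_neg (by rintro ⟨h, _⟩; omega)]
        simp
      simp only [hany, if_true, hj, hprev]
      apply List.ext_getElem
      · simp [STAGE]
      · intro i h1 h2
        simp only [STAGE, List.getElem_set, List.getElem_map, List.getElem_range]
        by_cases hik : k = i
        · subst hik
          rw [if_pos rfl, if_pos (by omega), if_neg (by rintro ⟨h, _⟩; omega)]
          unfold BASE
          rw [if_pos hhd]
          simp [TR]
        · rw [if_neg hik]
          by_cases hik1 : k - 1 = i
          · subst hik1
            rw [if_pos rfl, if_pos (by omega)]
            rw [show k - 1 + 1 = k from by omega]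
            rw [if_pos ⟨by omega, hhd, hany⟩]
            simp [SECL]
          · rw [if_neg hik1]
            have e1 : (i < k) = (i < k + 1) := by
              apply propext; constructor <;> intro <;> omega
            have e2 : (i + 1 < k) = (i + 1 < k + 1) := by
              apply propext; constructor <;> intro <;> omega
            simp only [e1, e2]
    · -- no previous header: just transform line k
      simp only [hany, if_false, Bool.false_eq_true]
      apply List.ext_getElem
      · simp [STAGE]
      · intro i h1 h2
        simp only [STAGE, List.getElem_set, List.getElem_map, List.getElem_range]
        by_cases hik : k = i
        · subst hik
          rw [if_pos rfl, if_pos (by omega), if_neg (by rintro ⟨h, _⟩; omega)]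
          unfold BASE
          rw [if_pos hhd]
          simp [TR]
        · rw [if_neg hik]
          have e1 : (i < k) = (i < k + 1) := by
            apply propext; constructor <;> intro <;> omega
          have e2 : ((i + 1 < k) ∧ HD sm orig (i+1) = true ∧ ANY sm orig (i+1) = true)
              = ((i + 1 < k + 1) ∧ HD sm orig (i+1) = true ∧ ANY sm orig (i+1) = true) := by
            apply propext
            constructor
            · rintro ⟨ha, hb, hc⟩; exact ⟨by omega, hb, hc⟩
            · rintro ⟨ha, hb, hc⟩
              refine ⟨?_, hb, hc⟩
              rcases Nat.lt_or_ge (i+1) k with h | h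
              · exact h
              · exfalso
                have hik2 : i + 1 = k := by omega
                rw [hik2] at hc
                exact hany hc
          simp only [e1, e2]
  · have hhd' : PySem.Str.isIn sm (orig.getD k "") = false := by
      rw [HD] at hhd
      exact Bool.not_eq_true _ |>.mp hhd
    simp only [hhd', Bool.false_eq_true, if_false]
    rw [if_neg (by rintro ⟨h, _⟩; omega : ¬ (k + 1 = orig.length ∧ ANY sm orig k = true))]
    have hhd'' : HD sm orig k = false := hhd'
    refine Prod.ext ?_ ?_
    swap
    · show ANY sm orig k = ANY sm orig (k+1)
      rw [ANY_succ, hhd'']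
      simp
    show STAGE sm hs he orig k = STAGE sm hs he orig (k+1)
    apply List.ext_getElem
    · simp [STAGE]
    · intro i h1 h2
      simp only [STAGE, List.getElem_map, List.getElem_range]
      by_cases hik : i = k
      · subst hik
        have hb : BASE sm hs he orig i = orig.getD i "" := by
          unfold BASE
          rw [hhd'']
          simp
        simp [hb]
      · have e1 : (i < k) = (i < k + 1) := by
          apply propext; constructor <;> intro <;> omega
        have e2 : ((i + 1 < k) ∧ HD sm orig (i+1) = true ∧ ANY sm orig (i+1) = true)
            = ((i + 1 < k + 1) ∧ HD sm orig (i+1) = true ∧ ANY sm orig (i+1) = true) := by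
          apply propext
          constructor
          · rintro ⟨ha, hb2, hc⟩; exact ⟨by omega, hb2, hc⟩
          · rintro ⟨ha, hb2, hc⟩
            refine ⟨?_, hb2, hc⟩
            rcases Nat.lt_or_ge (i+1) k with h | h
            · exact h
            · exfalso
              have hik2 : i + 1 = k := by omega
              rw [hik2, hhd''] at hb2
              cases hb2
        simp only [e1, e2]

lemma lastStep (sm hs he : String) (orig : List String) (hn : 0 < orig.length) :
    (aStep sm hs he orig.length
       (STAGE sm hs he orig (orig.length - 1), ANY sm orig (orig.length - 1))
       (orig.length - 1)).1 = FINAL sm hs he orig := by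
  obtain ⟨m, hm⟩ : ∃ m, orig.length = m + 1 := ⟨orig.length - 1, by omega⟩
  have hm' : orig.length - 1 = m := by omega
  rw [hm']
  have hline : (STAGE sm hs he orig m).getD m "" = orig.getD m "" := by
    rw [STAGE_getD sm hs he orig m m (by omega)]
    simp
  have hlen := STAGE_length sm hs he orig m
  simp only [aStep, hline, hlen]
  by_cases hhd : HD sm orig m
  · have hhd' : PySem.Str.isIn sm (orig.getD m "") = true := hhd
    simp only [hhd', if_true]
    have hend : m + 1 = orig.length ∧ True := ⟨by omega, trivial⟩
    rw [if_pos hend]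
    have hany2 : ANY sm orig orig.length = true := by
      rw [ANY_iff]
      exact ⟨m, by omega, hhd⟩
    by_cases hany : ANY sm orig m
    · have hk1 : 1 ≤ m := by
        rcases (ANY_iff sm orig m).mp hany with ⟨j, hj, _⟩
        omega
      have hj : pyIdx orig.length ((m : Int) - 1) = m - 1 := by
        unfold pyIdx
        rw [if_neg (by omega)]
        omega
      have hprev : (STAGE sm hs he orig m).getD (m-1) "" = BASE sm hs he orig (m-1) := by
        rw [STAGE_getD sm hs he orig m (m-1) (by omega)]
        rw [if_pos (by omega), if_neg (by rintro ⟨h, _⟩; omega)]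
        simp
      simp only [hany, if_true, hj, hprev]
      rw [List.set_set, getD_set]
      have hok : m = m ∧ m < ((STAGE sm hs he orig m).set (m-1)
          (BASE sm hs he orig (m-1) ++ "</section>\n")).length :=
        ⟨rfl, by rw [List.length_set, hlen]; omega⟩
      rw [if_pos hok]
      apply List.ext_getElem
      · simp [STAGE, FINAL]
      · intro i h1 h2
        have hi : i < orig.length := by
          simpa [STAGE] using h1
        simp only [FINAL, STAGE, List.getElem_set, List.getElem_map, List.getElem_range]
        by_cases hik : m = i
        · subst hik
          rw [if_pos rfl]
          have hc1 : ¬ (m + 1 < orig.length ∧ HD sm orig (m+1) = true ∧ ANY sm orig (m+1) = true) := by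
            rintro ⟨h, _⟩; omega
          have hc2 : m + 1 = orig.length ∧ ANY sm orig orig.length = true := ⟨by omega, hany2⟩
          rw [if_neg hc1, if_pos hc2]
          unfold BASE
          rw [if_pos hhd]
          simp [TR, SECL]
        · rw [if_neg hik]
          by_cases hik1 : m - 1 = i
          · subst hik1
            rw [if_pos rfl]
            rw [show m - 1 + 1 = m from by omega]
            have hc1 : m < orig.length ∧ HD sm orig m = true ∧ ANY sm orig m = true :=
              ⟨by omega, hhd, hany⟩
            have hc2 : ¬ (m = orig.length ∧ ANY sm orig orig.length = true) := by
              rintro ⟨h, _⟩; omega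
            rw [if_pos hc1, if_neg hc2]
            simp [SECL]
          · rw [if_neg hik1]
            have ha : i < m := by omega
            have hc2 : ¬ (i + 1 = orig.length ∧ ANY sm orig orig.length = true) := by
              rintro ⟨h, _⟩; omega
            have e2 : ((i + 1 < m) ∧ HD sm orig (i+1) = true ∧ ANY sm orig (i+1) = true)
                = ((i + 1 < orig.length) ∧ HD sm orig (i+1) = true ∧ ANY sm orig (i+1) = true) := by
              apply propext
              constructor
              · rintro ⟨ha2, hb, hc⟩; exact ⟨by omega, hb, hc⟩
              · rintro ⟨ha2, hb, hc⟩; exact ⟨by omega, hb, hc⟩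
            rw [if_pos ha, if_neg hc2]
            simp only [e2]
            simp
    · simp only [hany, if_false, Bool.false_eq_true]
      rw [List.set_set, getD_set]
      have hok : m = m ∧ m < (STAGE sm hs he orig m).length := ⟨rfl, by rw [hlen]; omega⟩
      rw [if_pos hok]
      apply List.ext_getElem
      · simp [STAGE, FINAL]
      · intro i h1 h2
        have hi : i < orig.length := by
          simpa [STAGE] using h1
        simp only [FINAL, STAGE, List.getElem_set, List.getElem_map, List.getElem_range]
        by_cases hik : m = i
        · subst hik
          rw [if_pos rfl]
          have hc1 : ¬ (m + 1 < orig.length ∧ HD sm orig (m+1) = true ∧ ANY sm orig (m+1) = true) := by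
            rintro ⟨h, _⟩; omega
          have hc2 : m + 1 = orig.length ∧ ANY sm orig orig.length = true := ⟨by omega, hany2⟩
          rw [if_neg hc1, if_pos hc2]
          unfold BASE
          rw [if_pos hhd]
          simp [TR, SECL]
        · rw [if_neg hik]
          have ha : i < m := by omega
          have hc2 : ¬ (i + 1 = orig.length ∧ ANY sm orig orig.length = true) := by
            rintro ⟨h, _⟩; omega
          have c1 : ¬ ((i + 1 < m) ∧ HD sm orig (i+1) = true ∧ ANY sm orig (i+1) = true) := by
            rintro ⟨ha2, hb, hc⟩
            exact hany (ANY_mono sm orig (by omega) hc)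
          have c2 : ¬ ((i + 1 < orig.length) ∧ HD sm orig (i+1) = true ∧ ANY sm orig (i+1) = true) := by
            rintro ⟨ha2, hb, hc⟩
            exact hany (ANY_mono sm orig (by omega) hc)
          rw [if_pos ha, if_neg c1, if_neg c2, if_neg hc2]
          simp
  · have hhd' : PySem.Str.isIn sm (orig.getD m "") = false := by
      rw [HD] at hhd
      exact Bool.not_eq_true _ |>.mp hhd
    have hhd'' : HD sm orig m = false := hhd'
    simp only [hhd', Bool.false_eq_true, if_false]
    by_cases hany : ANY sm orig m
    · have hend : m + 1 = orig.length ∧ ANY sm orig m = true := ⟨by omega, hany⟩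
      rw [if_pos hend]
      have hany2 : ANY sm orig orig.length = true := ANY_mono sm orig (by omega) hany
      rw [hline]
      apply List.ext_getElem
      · simp [STAGE, FINAL]
      · intro i h1 h2
        have hi : i < orig.length := by
          simpa [STAGE] using h1
        simp only [FINAL, STAGE, List.getElem_set, List.getElem_map, List.getElem_range]
        by_cases hik : m = i
        · subst hik
          rw [if_pos rfl]
          have hc1 : ¬ (m + 1 < orig.length ∧ HD sm orig (m+1) = true ∧ ANY sm orig (m+1) = true) := by
            rintro ⟨h, _⟩; omega
          have hc2 : m + 1 = orig.length ∧ ANY sm orig orig.length = true := ⟨by omega, hany2⟩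
          rw [if_neg hc1, if_pos hc2]
          unfold BASE
          rw [hhd'']
          simp [SECL]
        · rw [if_neg hik]
          have ha : i < m := by omega
          have hc2 : ¬ (i + 1 = orig.length ∧ ANY sm orig orig.length = true) := by
            rintro ⟨h, _⟩; omega
          have e2 : ((i + 1 < m) ∧ HD sm orig (i+1) = true ∧ ANY sm orig (i+1) = true)
              = ((i + 1 < orig.length) ∧ HD sm orig (i+1) = true ∧ ANY sm orig (i+1) = true) := by
            apply propext
            constructor
            · rintro ⟨ha2, hb, hc⟩; exact ⟨by omega, hb, hc⟩
            · rintro ⟨ha2, hb, hc⟩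
              refine ⟨?_, hb, hc⟩
              rcases Nat.lt_or_ge (i+1) m with h | h
              · exact h
              · exfalso
                have hik2 : i + 1 = m := by omega
                rw [hik2, hhd''] at hb
                cases hb
          rw [if_pos ha, if_neg hc2]
          simp only [e2]
          simp
    · rw [if_neg (by rintro ⟨h, hs2⟩; exact hany hs2)]
      have hany2 : ANY sm orig orig.length = false := by
        rw [hm, ANY_succ, hhd'']
        rw [Bool.not_eq_true] at hany
        rw [hany]
        rfl
      show STAGE sm hs he orig m = FINAL sm hs he orig
      apply List.ext_getElem
      · simp [STAGE, FINAL]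
      · intro i h1 h2
        have hi : i < orig.length := by
          simpa [STAGE] using h1
        simp only [FINAL, STAGE, List.getElem_map, List.getElem_range]
        have hc2 : ¬ (i + 1 = orig.length ∧ ANY sm orig orig.length = true) := by
          rw [hany2]
          rintro ⟨h, hc⟩
          cases hc
        rw [if_neg hc2]
        by_cases hik : i = m
        · have hl : ¬ (i < m) := by omega
          have hc1 : ¬ ((i + 1 < m) ∧ HD sm orig (i+1) = true ∧ ANY sm orig (i+1) = true) := by
            rintro ⟨h, _⟩; omega
          have hc1' : ¬ ((i + 1 < orig.length) ∧ HD sm orig (i+1) = true ∧ ANY sm orig (i+1) = true) := by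
            rintro ⟨h, _⟩; omega
          rw [if_neg hl, if_neg hc1, if_neg hc1']
          unfold BASE
          rw [hik, hhd'']
          simp
        · have ha : i < m := by omega
          have c1 : ¬ ((i + 1 < m) ∧ HD sm orig (i+1) = true ∧ ANY sm orig (i+1) = true) := by
            rintro ⟨ha2, hb, hc⟩
            exact hany (ANY_mono sm orig (by omega) hc)
          have c2 : ¬ ((i + 1 < orig.length) ∧ HD sm orig (i+1) = true ∧ ANY sm orig (i+1) = true) := by
            rintro ⟨ha2, hb, hc⟩
            have hle : i + 1 ≤ m := by omega
            exact hany (ANY_mono sm orig hle hc)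
          rw [if_pos ha, if_neg c1, if_neg c2]
          simp

lemma foldA (sm hs he : String) (orig : List String) :
    ∀ k, k < orig.length →
      (List.range k).foldl (aStep sm hs he orig.length) (orig, false)
        = (STAGE sm hs he orig k, ANY sm orig k) := by
  intro k
  induction k with
  | zero =>
      intro _
      simp only [List.range_zero, List.foldl_nil]
      have h1 : STAGE sm hs he orig 0 = orig := by
        unfold STAGE
        have h2 : ∀ i ∈ List.range orig.length,
            ((if i < 0 then BASE sm hs he orig i else orig.getD i "") ++
             (if i + 1 < 0 ∧ HD sm orig (i+1) = true ∧ ANY sm orig (i+1) = true then SECL else ""))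
            = orig.getD i "" := by
          intro i _
          simp
        rw [List.map_congr_left h2, map_getD_range]
      rw [h1]
      simp [ANY]
  | succ k ih =>
      intro hk
      rw [List.range_succ, List.foldl_append, ih (by omega)]
      simp only [List.foldl_cons, List.foldl_nil]
      exact midStep sm hs he orig k hk

lemma A_eq_FINAL (mb : List String) (sm hs he : String) :
    handle_syntax_py mb sm hs he = FINAL sm hs he mb := by
  rcases Nat.eq_zero_or_pos mb.length with h0 | hpos
  · have : mb = [] := List.length_eq_zero_iff.mp h0
    subst this
    simp [handle_syntax_py, FINAL]
  · obtain ⟨m, hm⟩ : ∃ m, mb.length = m + 1 := ⟨mb.length - 1, by omega⟩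
    unfold handle_syntax_py
    rw [show List.range mb.length = List.range m ++ [m] from by rw [hm, List.range_succ]]
    rw [List.foldl_append, foldA sm hs he mb m (by omega)]
    simp only [List.foldl_cons, List.foldl_nil]
    have h2 := lastStep sm hs he mb hpos
    rw [hm] at h2
    simp only [Nat.add_sub_cancel] at h2
    rw [← hm] at h2
    exact h2

-- ----- B side -----

lemma filterMap_ite {α β : Type} (p : α → Bool) (g : α → β) :
    ∀ l : List α, l.filterMap (fun x => if p x then some (g x) else none) = (l.filter p).map g := by
  intro l
  induction l with
  | nil => simp
  | cons a t ih =>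
      by_cases h : p a <;> simp [List.filterMap_cons, List.filter_cons, h, ih]

lemma headsB (sm : String) (mb : List String) :
    (PySem.List.enumerate mb).filterMap (fun p => if PySem.Str.isIn sm p.2 then some p.1 else none)
      = ((List.range mb.length).filter (HD sm mb)).map Int.ofNat := by
  rw [PySem.List.enumerate_eq_map_pyRange mb "", List.filterMap_map]
  have h1 : PySem.List.pyRange 0 (PySem.List.len mb) 1
      = (List.range mb.length).map Int.ofNat := by
    rw [show PySem.List.len mb = ((mb.length : Int)) from by simp, PySem.List.pyRange_one]
    rw [show ((mb.length : Int) - 0).toNat = mb.length from by omega]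
    apply List.map_congr_left
    intro k _
    show 0 + (k : Int) = Int.ofNat k
    rw [zero_add]
    rfl
  rw [h1, List.filterMap_map]
  have h2 : (((fun p : Int × String => if PySem.Str.isIn sm p.2 = true then some p.1 else none) ∘
      (fun j : Int => (j, PySem.List.pyGetD mb j ""))) ∘ Int.ofNat)
      = fun k : Nat => if HD sm mb k = true then some (Int.ofNat k) else none := by
    funext k
    show (if PySem.Str.isIn sm (PySem.List.pyGetD mb (Int.ofNat k) "") = true
        then some (Int.ofNat k) else none) = _
    rw [show (Int.ofNat k) = ((k : Int)) from rfl, PySem.List.pyGetD_natCast]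
    rfl
  rw [h2, filterMap_ite (HD sm mb) Int.ofNat]

lemma foldT (sm hs he : String) (orig : List String) :
    ∀ (l : List Nat) (body : List String), body.length = orig.length →
      (∀ h ∈ l, h < orig.length ∧ HD sm orig h = true ∧ body.getD h "" = orig.getD h "") →
      l.Nodup →
      l.foldl (fun b h => b.set h (TR sm hs he (b.getD h ""))) body
        = (List.range orig.length).map
            (fun i => if i ∈ l then TR sm hs he (orig.getD i "") else body.getD i "") := by
  intro l
  induction l with
  | nil =>
      intro body hlen hmem hnd
      simp only [List.foldl_nil, List.not_mem_nil, if_false]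
      rw [← hlen]
      exact (map_getD_range body "").symm
  | cons h t ih =>
      intro body hlen hmem hnd
      obtain ⟨hlt, hhd, hgd⟩ := hmem h List.mem_cons_self
      simp only [List.foldl_cons]
      rw [hgd]
      have hnd' := (List.nodup_cons.mp hnd)
      rw [ih (body.set h (TR sm hs he (orig.getD h ""))) (by rw [List.length_set, hlen]) ?_ hnd'.2]
      · apply List.map_congr_left
        intro i hi
        rw [List.mem_range] at hi
        by_cases hit : i ∈ t
        · rw [if_pos hit, if_pos (List.mem_cons_of_mem h hit)]
        · rw [if_neg hit]
          rw [getD_set]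
          by_cases hih : h = i
          · subst hih
            rw [if_pos ⟨rfl, by omega⟩, if_pos List.mem_cons_self]
          · rw [if_neg (by rintro ⟨hq, _⟩; exact hih hq)]
            rw [if_neg (by
              intro hmem2
              rcases List.mem_cons.mp hmem2 with rfl | hq
              · exact hih rfl
              · exact hit hq)]
      · intro h' hh'
        obtain ⟨hl', hd', hg'⟩ := hmem h' (List.mem_cons_of_mem h hh')
        refine ⟨hl', hd', ?_⟩
        rw [getD_set, if_neg (by
          rintro ⟨hq, _⟩
          exact hnd'.1 (hq ▸ hh'))]
        exact hg'

lemma foldC :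
    ∀ (l : List Nat) (body : List String), l.Nodup → (∀ c ∈ l, c < body.length) →
      l.foldl (fun b c => b.set c (b.getD c "" ++ SECL)) body
        = (List.range body.length).map (fun i => body.getD i "" ++ if i ∈ l then SECL else "") := by
  intro l
  induction l with
  | nil =>
      intro body hnd hr
      simp only [List.foldl_nil, List.not_mem_nil, if_false]
      have : ∀ i ∈ List.range body.length, body.getD i "" ++ "" = body.getD i "" := by
        intro i _
        simp
      rw [List.map_congr_left this, map_getD_range]
  | cons c t ih =>
      intro body hnd hr
      have hc := hr c List.mem_cons_self
      have hnd' := List.nodup_cons.mp hnd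
      simp only [List.foldl_cons]
      rw [ih (body.set c (body.getD c "" ++ SECL)) hnd'.2 (by
        intro c' hc'
        rw [List.length_set]
        exact hr c' (List.mem_cons_of_mem c hc'))]
      rw [List.length_set]
      apply List.map_congr_left
      intro i hi
      rw [List.mem_range] at hi
      rw [getD_set]
      by_cases hic : c = i
      · subst hic
        rw [if_pos ⟨rfl, hc⟩, if_neg hnd'.1, if_pos List.mem_cons_self]
        simp
      · rw [if_neg (by rintro ⟨hq, _⟩; exact hic hq)]
        by_cases hit : i ∈ t
        · rw [if_pos hit, if_pos (List.mem_cons_of_mem c hit)]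
        · rw [if_neg hit, if_neg (by
            intro hmem2
            rcases List.mem_cons.mp hmem2 with rfl | hq
            · exact hic rfl
            · exact hit hq)]

lemma mem_tail_filter_range (p : Nat → Bool) (n h : Nat) :
    h ∈ ((List.range n).filter p).tail ↔ h < n ∧ p h = true ∧ ∃ j < h, p j = true := by
  have hpw : ((List.range n).filter p).Pairwise (· < ·) :=
    List.Pairwise.sublist List.filter_sublist List.pairwise_lt_range
  rcases hl : (List.range n).filter p with _ | ⟨a, t⟩
  · simp only [List.tail_nil, List.not_mem_nil, false_iff]
    rintro ⟨h1, h2, _⟩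
    have hmem : h ∈ (List.range n).filter p :=
      List.mem_filter.mpr ⟨List.mem_range.mpr h1, h2⟩
    rw [hl] at hmem
    cases hmem
  · simp only [List.tail_cons]
    constructor
    · intro ht
      have hmem : h ∈ (List.range n).filter p := by
        rw [hl]
        exact List.mem_cons_of_mem a ht
      have hm2 := List.mem_filter.mp hmem
      refine ⟨List.mem_range.mp hm2.1, hm2.2, ?_⟩
      have ha : a ∈ (List.range n).filter p := by
        rw [hl]
        exact List.mem_cons_self
      have hlt : a < h := by
        rw [hl] at hpw
        exact (List.pairwise_cons.mp hpw).1 h ht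
      exact ⟨a, hlt, (List.mem_filter.mp ha).2⟩
    · rintro ⟨h1, h2, j, hj, hpj⟩
      have hmem : h ∈ (List.range n).filter p :=
        List.mem_filter.mpr ⟨List.mem_range.mpr h1, h2⟩
      have hjmem : j ∈ (List.range n).filter p :=
        List.mem_filter.mpr ⟨List.mem_range.mpr (by omega), hpj⟩
      rw [hl] at hmem hjmem hpw
      rcases List.mem_cons.mp hmem with rfl | ht
      · rcases List.mem_cons.mp hjmem with rfl | hjt
        · omega
        · have := (List.pairwise_cons.mp hpw).1 j hjt
          omega
      · exact ht

lemma B_eq_FINAL (mb : List String) (sm hs he : String) :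
    handle_syntax_py_alt mb sm hs he = FINAL sm hs he mb := by
  have hstepT : ∀ (b : List String) (h : Nat),
      bStepT sm hs he b (Int.ofNat h) = b.set h (TR sm hs he (b.getD h "")) := by
    intro b h
    have hp : pyIdx b.length (Int.ofNat h) = h := by
      unfold pyIdx
      rw [show Int.ofNat h = ((h : Int)) from rfl, if_neg (by omega)]
      omega
    simp only [bStepT]
    rw [hp]
    rfl
  have hstepC : (fun (b : List String) (c : Nat) => bStepC b (Int.ofNat c))
      = fun b c => b.set c (b.getD c "" ++ SECL) := by
    funext b c
    have hp : pyIdx b.length (Int.ofNat c) = c := by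
      unfold pyIdx
      rw [show Int.ofNat c = ((c : Int)) from rfl, if_neg (by omega)]
      omega
    simp only [bStepC]
    rw [hp]
    rfl
  simp only [handle_syntax_py_alt]
  rw [headsB]
  rcases hfe : (List.range mb.length).filter (HD sm mb) with _ | ⟨h0, t0⟩
  · -- no header line at all
    simp only [List.map_nil, List.tail_nil, List.isEmpty_nil, if_true, List.append_nil,
      List.foldl_nil]
    have hnohd : ∀ j, j < mb.length → HD sm mb j = false := by
      intro j hj
      by_cases hc : HD sm mb j = true
      · exfalso
        have hmem : j ∈ (List.range mb.length).filter (HD sm mb) :=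
          List.mem_filter.mpr ⟨List.mem_range.mpr hj, hc⟩
        rw [hfe] at hmem
        cases hmem
      · exact Bool.not_eq_true _ |>.mp hc
    refine Eq.symm ?_
    unfold FINAL
    have hcg : ∀ i ∈ List.range mb.length,
        BASE sm hs he mb i ++
          (if i + 1 < mb.length ∧ HD sm mb (i+1) = true ∧ ANY sm mb (i+1) = true then SECL else "") ++
          (if i + 1 = mb.length ∧ ANY sm mb mb.length = true then SECL else "")
        = mb.getD i "" := by
      intro i hi
      rw [List.mem_range] at hi
      have hc1 : ¬ (i + 1 < mb.length ∧ HD sm mb (i+1) = true ∧ ANY sm mb (i+1) = true) := by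
        rintro ⟨ha, hb, _⟩
        rw [hnohd (i+1) ha] at hb
        cases hb
      have hc2 : ¬ (i + 1 = mb.length ∧ ANY sm mb mb.length = true) := by
        rintro ⟨ha, hb⟩
        rcases (ANY_iff sm mb mb.length).mp hb with ⟨j, hj, hh⟩
        rw [hnohd j hj] at hh
        cases hh
      rw [if_neg hc1, if_neg hc2]
      unfold BASE
      rw [hnohd i hi]
      simp
    rw [List.map_congr_left hcg, map_getD_range]
  · -- at least one header line
    have hmem0 : h0 ∈ (List.range mb.length).filter (HD sm mb) := by
      rw [hfe]
      exact List.mem_cons_self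
    have h0lt : h0 < mb.length := List.mem_range.mp (List.mem_filter.mp hmem0).1
    have h0hd : HD sm mb h0 = true := (List.mem_filter.mp hmem0).2
    have hn1 : 0 < mb.length := by omega
    have hanyn : ANY sm mb mb.length = true := (ANY_iff sm mb mb.length).mpr ⟨h0, h0lt, h0hd⟩
    have hmemnh : ∀ h ∈ h0 :: t0, h < mb.length ∧ HD sm mb h = true := by
      intro h hh
      rw [← hfe] at hh
      exact ⟨List.mem_range.mp (List.mem_filter.mp hh).1, (List.mem_filter.mp hh).2⟩
    have ht0 : ∀ h ∈ t0, h < mb.length ∧ HD sm mb h = true ∧ ∃ j < h, HD sm mb j = true := by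
      intro h hh
      have hht : h ∈ ((List.range mb.length).filter (HD sm mb)).tail := by
        rw [hfe]
        simpa using hh
      exact (mem_tail_filter_range (HD sm mb) mb.length h).mp hht
    have hnd : (h0 :: t0).Nodup := by
      rw [← hfe]
      exact (List.nodup_range).filter _
    -- the transform pass produces the BASE lines
    have hT : ((h0 :: t0).map Int.ofNat).foldl (bStepT sm hs he) mb
        = (List.range mb.length).map (BASE sm hs he mb) := by
      rw [List.foldl_map]
      have hfn : (fun (b : List String) (h : Nat) => bStepT sm hs he b (Int.ofNat h))
          = fun b h => b.set h (TR sm hs he (b.getD h "")) := by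
        funext b h
        exact hstepT b h
      rw [hfn, foldT sm hs he mb (h0 :: t0) mb rfl
        (fun h hh => ⟨(hmemnh h hh).1, (hmemnh h hh).2, rfl⟩) hnd]
      apply List.map_congr_left
      intro i hi
      rw [List.mem_range] at hi
      unfold BASE
      by_cases hmem : i ∈ h0 :: t0
      · rw [if_pos hmem, if_pos (hmemnh i hmem).2]
      · rw [if_neg hmem, if_neg (fun hh => hmem (by
          rw [← hfe]
          exact List.mem_filter.mpr ⟨List.mem_range.mpr hi, hh⟩))]
    simp only [List.map_cons, List.tail_cons, List.isEmpty_cons, Bool.false_eq_true, if_false]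
    rw [List.map_cons] at hT
    rw [hT, List.map_map]
    have hcl : t0.map ((fun h : Int => h - 1) ∘ Int.ofNat) ++ [(mb.length : Int) - 1]
        = (t0.map (fun h => h - 1) ++ [mb.length - 1]).map Int.ofNat := by
      rw [List.map_append, List.map_map]
      congr 1
      · apply List.map_congr_left
        intro h hh
        obtain ⟨hlt, hhd2, j, hj, hjh⟩ := ht0 h hh
        show Int.ofNat h - 1 = Int.ofNat (h - 1)
        simp only [Int.ofNat_eq_natCast]
        omega
      · show [(mb.length : Int) - 1] = [Int.ofNat (mb.length - 1)]
        congr 1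
        simp only [Int.ofNat_eq_natCast]
        omega
    rw [hcl, List.foldl_map, hstepC]
    have hndt0 : t0.Nodup := (List.nodup_cons.mp hnd).2
    have hndc : (t0.map (fun h => h - 1) ++ [mb.length - 1]).Nodup := by
      rw [List.nodup_append]
      refine ⟨?_, List.nodup_singleton _, ?_⟩
      · refine hndt0.map_on ?_
        intro x hx y hy hxy
        obtain ⟨_, _, jx, hjx, _⟩ := ht0 x hx
        obtain ⟨_, _, jy, hjy, _⟩ := ht0 y hy
        omega
      · intro a ha b hb
        rcases List.mem_map.mp ha with ⟨h, hh, rfl⟩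
        obtain ⟨hlt, _, j, hj, _⟩ := ht0 h hh
        have hb2 : b = mb.length - 1 := List.mem_singleton.mp hb
        omega
    have hrange : ∀ c ∈ t0.map (fun h => h - 1) ++ [mb.length - 1],
        c < ((List.range mb.length).map (BASE sm hs he mb)).length := by
      intro c hc
      rw [List.length_map, List.length_range]
      rcases List.mem_append.mp hc with hA | hB
      · rcases List.mem_map.mp hA with ⟨h, hh, rfl⟩
        obtain ⟨hlt, _, _⟩ := ht0 h hh
        omega
      · have : c = mb.length - 1 := List.mem_singleton.mp hB
        omega
    rw [foldC (t0.map (fun h => h - 1) ++ [mb.length - 1])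
      ((List.range mb.length).map (BASE sm hs he mb)) hndc hrange]
    rw [show ((List.range mb.length).map (BASE sm hs he mb)).length = mb.length from by simp]
    unfold FINAL
    apply List.map_congr_left
    intro i hi
    rw [List.mem_range] at hi
    rw [PySem.List.getD_map_range _ _ _ _ hi]
    by_cases hc1 : (i + 1 < mb.length ∧ HD sm mb (i+1) = true ∧ ANY sm mb (i+1) = true)
    · have hmem : i ∈ t0.map (fun h => h - 1) ++ [mb.length - 1] := by
        apply List.mem_append_left
        apply List.mem_map.mpr
        refine ⟨i + 1, ?_, by omega⟩
        have hin : i + 1 ∈ ((List.range mb.length).filter (HD sm mb)).tail := by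
          rw [mem_tail_filter_range]
          obtain ⟨ha, hb, hcny⟩ := hc1
          rcases (ANY_iff sm mb (i+1)).mp hcny with ⟨j, hj, hjh⟩
          exact ⟨ha, hb, j, hj, hjh⟩
        rw [hfe] at hin
        simpa using hin
      rw [if_pos hmem, if_pos hc1]
      have hc2 : ¬ (i + 1 = mb.length ∧ ANY sm mb mb.length = true) := by
        rintro ⟨h, _⟩
        omega
      rw [if_neg hc2]
      simp [SECL]
    · by_cases hc2 : i + 1 = mb.length
      · have hmem : i ∈ t0.map (fun h => h - 1) ++ [mb.length - 1] := by
          apply List.mem_append_right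
          simp only [List.mem_singleton]
          omega
        rw [if_pos hmem, if_neg hc1, if_pos ⟨hc2, hanyn⟩]
        simp [SECL]
      · have hmem : i ∉ t0.map (fun h => h - 1) ++ [mb.length - 1] := by
          intro hmem
          rcases List.mem_append.mp hmem with hA | hB
          · rcases List.mem_map.mp hA with ⟨h, hh, hhi⟩
            have hin : h ∈ ((List.range mb.length).filter (HD sm mb)).tail := by
              rw [hfe]
              simpa using hh
            rw [mem_tail_filter_range] at hin
            obtain ⟨hlt, hhd2, j, hj, hjh⟩ := hin
            have hh1 : h = i + 1 := by omega
            subst hh1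
            exact hc1 ⟨by omega, hhd2, (ANY_iff sm mb (i+1)).mpr ⟨j, hj, hjh⟩⟩
          · have : i = mb.length - 1 := List.mem_singleton.mp hB
            omega
        rw [if_neg hmem, if_neg hc1]
        rw [if_neg (by rintro ⟨h, _⟩; exact hc2 h)]
        simp

-- ===== VERDICT (by name: the statement is the Claim_ definition above) =====
theorem handle_syntax_py_spec : Claim_equal_handle_syntax_py := by
  intro mb sm hs he _
  unfold Spec_handle_syntax_py
  rw [A_eq_FINAL, B_eq_FINAL]
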